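-- pv_equiv track=rewrite | github.com/MikhailKras/summer_yandex_algorithms | rejection.py | get_right_materials
-- ===== SOURCE A (Python) =====
-- def get_right_materials(first_type, materials):
--     vowel_set = {'a', 'e', 'i', 'o', 'u'}
--
--     def mat_replace(word):
--         univ_word = list(word)
--         for j in range(len(word)):
--             if word[j].lower() in vowel_set:
--                 univ_word[j] = '#'
--         return ''.join(univ_word).lower()
--
--     first_type_set = set(first_type)
--     ans = []
--
--     dict_two = dict()
--     for mat in first_type:
--         mat_key = mat.lower()
--         if not dict_two.get(mat_key):
--             dict_two[mat_key] = mat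
--
--     dict_three = dict()
--     for mat in first_type:
--         mat_key = mat_replace(mat)
--         if not dict_three.get(mat_key):
--             dict_three[mat_key] = mat
--
--     for mat in materials:
--         if mat in first_type_set:
--             ans.append(mat)
--         elif mat.lower() in dict_two:
--             ans.append(dict_two[mat.lower()])
--         elif mat_replace(mat) in dict_three:
--             ans.append(dict_three[mat_replace(mat)])
--         else:
--             ans.append('')
--     return ' '.join(ans)
-- ===== SOURCE B (Python) =====
-- def get_right_materials(first_type, materials):
--     def masked(word):
--         return ''.join('#' if c in 'aeiou' else c for c in word.lower())
--
--     def pick(m):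
--         if m in first_type:
--             return m
--         m_low = m.lower()
--         for x in first_type:
--             if x.lower() == m_low:
--                 return x
--         m_mask = masked(m)
--         for x in first_type:
--             if masked(x) == m_mask:
--                 return x
--         return ''
--
--     return ' '.join(pick(m) for m in materials)
-- ===== Notes on version B (the rewrite author's own statement) =====
-- stated objective: simpler
-- what changed: Drops A's membership set and the two precomputed first-insertion dicts entirely: each material is resolved by three ordered direct scans of first_type (exact membership, first case-insensitive match, first vowel-masked match), so no lookup table is built or maintained.
import Mathlib
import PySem

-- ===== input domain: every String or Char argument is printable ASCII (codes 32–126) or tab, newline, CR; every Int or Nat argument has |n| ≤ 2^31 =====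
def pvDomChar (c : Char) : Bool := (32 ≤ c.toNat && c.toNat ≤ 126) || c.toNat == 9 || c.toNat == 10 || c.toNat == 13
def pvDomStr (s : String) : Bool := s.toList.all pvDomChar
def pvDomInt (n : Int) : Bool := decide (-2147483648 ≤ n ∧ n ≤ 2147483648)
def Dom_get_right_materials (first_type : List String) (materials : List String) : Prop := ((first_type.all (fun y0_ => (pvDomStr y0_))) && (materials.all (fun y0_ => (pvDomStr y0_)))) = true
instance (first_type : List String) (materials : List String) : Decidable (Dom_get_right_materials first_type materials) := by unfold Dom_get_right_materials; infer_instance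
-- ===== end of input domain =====

-- B drops A's membership set and both precomputed first-insertion dicts: each material is resolved by
-- three ordered direct scans of first_type (exact, case-insensitive, vowel-masked); simpler, no table kept.


-- ===== PORT A =====
-- mat_replace: the index loop replacing vowels by '#' is a map over the characters, then join + lower
def pvMatReplace (word : String) : String :=
  PySem.Str.lower (String.ofList (word.toList.map (fun c =>
    if PySem.Set.contains (PySem.Set.ofList ['a','e','i','o','u']) (PySem.Chars.lowerChar c) then '#' else c)))

-- one iteration of A's dict-building loops: "if not d.get(key): d[key] = mat"
def pvStep (f : String → String) (d : PySem.Dict String String) (mat : String) : PySem.Dict String String :=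
  match d.get? (f mat) with
  | none => d.insert (f mat) mat
  | some v => if v = "" then d.insert (f mat) mat else d

def get_right_materials (first_type : List String) (materials : List String) : String :=
  let first_type_set : PySem.Set String := PySem.Set.ofList first_type
  let dict_two := first_type.foldl (pvStep PySem.Str.lower) PySem.Dict.empty
  let dict_three := first_type.foldl (pvStep pvMatReplace) PySem.Dict.empty
  let ans := materials.foldl (fun ans mat =>
    if PySem.Set.contains first_type_set mat then ans ++ [mat]
    else if dict_two.contains (PySem.Str.lower mat) then ans ++ [dict_two.getD (PySem.Str.lower mat) ""]
    else if dict_three.contains (pvMatReplace mat) then ans ++ [dict_three.getD (pvMatReplace mat) ""]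
    else ans ++ [""]) []
  PySem.Str.join " " ans

-- ===== PORT B =====
-- B's masked: lower the word first, then replace (already-lowercase) vowels by '#'
def pvMaskedB (word : String) : String :=
  String.ofList ((PySem.Str.lower word).toList.map (fun c =>
    if "aeiou".toList.contains c then '#' else c))

-- B's pick: three ordered scans of first_type (the for-loops returning the first hit are find?)
def pvPickB (first_type : List String) (m : String) : String :=
  if first_type.contains m then m
  else
    match first_type.find? (fun x => PySem.Str.lower x == PySem.Str.lower m) with
    | some x => x
    | none =>
      match first_type.find? (fun x => pvMaskedB x == pvMaskedB m) with
      | some x => x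
      | none => ""

def get_right_materials_alt (first_type : List String) (materials : List String) : String :=
  PySem.Str.join " " (materials.map (pvPickB first_type))

-- ===== PRECONDITION & SPEC =====
def Spec_get_right_materials (first_type : List String) (materials : List String) (out : String) : Prop := out = get_right_materials_alt first_type materials
instance (first_type : List String) (materials : List String) (out : String) : Decidable (Spec_get_right_materials first_type materials out) := by unfold Spec_get_right_materials; infer_instance

-- ===== CLAIM (what is proved, stated in full; the proofs are below) =====
def Claim_equal_get_right_materials : Prop := ∀ (first_type : List String) (materials : List String), Dom_get_right_materials first_type materials → Spec_get_right_materials first_type materials (get_right_materials first_type materials)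

-- ===== LEMMAS AND PROOFS =====

-- the per-material value of A's answer loop
def pvAns (first_type : List String) (mat : String) : String :=
  if PySem.Set.contains (PySem.Set.ofList first_type) mat then mat
  else if (first_type.foldl (pvStep PySem.Str.lower) PySem.Dict.empty).contains (PySem.Str.lower mat) then
    (first_type.foldl (pvStep PySem.Str.lower) PySem.Dict.empty).getD (PySem.Str.lower mat) ""
  else if (first_type.foldl (pvStep pvMatReplace) PySem.Dict.empty).contains (pvMatReplace mat) then
    (first_type.foldl (pvStep pvMatReplace) PySem.Dict.empty).getD (pvMatReplace mat) ""
  else ""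

-- A masks then lowers; B lowers then masks: the same string, character by character
theorem pvMatReplace_eq_pvMaskedB (w : String) : pvMatReplace w = pvMaskedB w := by
  unfold pvMatReplace pvMaskedB
  apply String.toList_injective
  simp only [PySem.Str.toList_lower, String.toList_ofList, PySem.Chars.lower, List.map_map]
  apply List.map_congr_left
  intro c _
  simp only [Function.comp, PySem.Set.contains_eq_listContains, List.contains_eq_mem,
    decide_eq_true_eq, PySem.Set.mem_ofList, show "aeiou".toList = ['a','e','i','o','u'] from rfl]
  by_cases hP : PySem.Chars.lowerChar c ∈ ['a','e','i','o','u']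
  · rw [if_pos hP, if_pos hP]; decide
  · rw [if_neg hP, if_neg hP]

-- the key functions send only "" to ""
theorem pvLower_eq_empty {x : String} (h : PySem.Str.lower x = "") : x = "" := by
  have h1 : PySem.Chars.lower x.toList = [] := by
    have := congrArg String.toList h
    simpa [PySem.Str.lower, String.toList_ofList] using this
  have h2 : x.toList = [] := by
    simpa [PySem.Chars.lower] using h1
  exact String.toList_eq_nil_iff.mp h2

theorem pvMatReplace_eq_empty {x : String} (h : pvMatReplace x = "") : x = "" := by
  unfold pvMatReplace at h
  have h2 := pvLower_eq_empty h
  have h3 := congrArg String.toList h2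
  rw [String.toList_ofList] at h3
  simp only [String.toList_empty, List.map_eq_nil_iff] at h3
  exact String.toList_eq_nil_iff.mp h3

theorem pvLower_empty : PySem.Str.lower "" = "" := rfl
theorem pvMatReplace_empty : pvMatReplace "" = "" := rfl

-- A's dict-building loop computes first-match lookup
theorem pvFoldl_step_get (f : String → String)
    (Hf : ∀ x, f x = "" → x = "") (Hf0 : f "" = "")
    (l : List String) (d : PySem.Dict String String)
    (hInv : ∀ k v, d.get? k = some v → f v = k) (k : String) :
    (l.foldl (pvStep f) d).get? k = (d.get? k).or (l.find? (fun x => f x == k)) := by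
  induction l generalizing d with
  | nil => simp
  | cons x l ih =>
    have hInv' : ∀ k' v, (pvStep f d x).get? k' = some v → f v = k' := by
      intro k' v hv
      rcases hd : d.get? (f x) with _ | w
      · simp only [pvStep, hd] at hv
        rw [PySem.Dict.get?_insert] at hv
        split at hv
        · next heq => injection hv with h; subst h; exact heq.symm
        · exact hInv _ _ hv
      · simp only [pvStep, hd] at hv
        by_cases hw : w = ""
        · rw [if_pos hw] at hv
          rw [PySem.Dict.get?_insert] at hv
          split at hv
          · next heq => injection hv with h; subst h; exact heq.symm
          · exact hInv _ _ hv
        · rw [if_neg hw] at hv; exact hInv _ _ hv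
    rw [List.foldl_cons, ih _ hInv']
    by_cases hk : f x = k
    · subst hk
      rw [List.find?_cons_of_pos (by simp)]
      rcases hd : d.get? (f x) with _ | v
      · have hstep : (pvStep f d x).get? (f x) = some x := by
          simp only [pvStep, hd]
          rw [PySem.Dict.get?_insert, if_pos rfl]
        rw [hstep]; simp
      · by_cases hv : v = ""
        · have hfx : f x = "" := by
            have hfv := hInv _ _ hd
            rw [hv, Hf0] at hfv
            exact hfv.symm
          have hx : x = "" := Hf x hfx
          have hstep : (pvStep f d x).get? (f x) = some x := by
            simp only [pvStep, hd, if_pos hv]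
            rw [PySem.Dict.get?_insert, if_pos rfl]
          rw [hstep]
          simp [hx, hv]
        · have hstep : (pvStep f d x).get? (f x) = some v := by
            simp only [pvStep, hd, if_neg hv]
          rw [hstep]; simp
    · have hstep : (pvStep f d x).get? k = d.get? k := by
        rcases hd : d.get? (f x) with _ | v
        · simp only [pvStep, hd]
          rw [PySem.Dict.get?_insert, if_neg (fun h => hk h.symm)]
        · simp only [pvStep, hd]
          split
          · rw [PySem.Dict.get?_insert, if_neg (fun h => hk h.symm)]
          · rfl
      rw [hstep, List.find?_cons_of_neg (by simp [hk])]

theorem pvDict_get (f : String → String)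
    (Hf : ∀ x, f x = "" → x = "") (Hf0 : f "" = "")
    (l : List String) (k : String) :
    (l.foldl (pvStep f) PySem.Dict.empty).get? k = l.find? (fun x => f x == k) := by
  rw [pvFoldl_step_get f Hf Hf0 l PySem.Dict.empty (by intro k v h; simp at h) k]
  simp

theorem pvSet_contains (l : List String) (m : String) :
    PySem.Set.contains (PySem.Set.ofList l) m = l.contains m := by
  simp only [PySem.Set.contains]
  rw [Bool.eq_iff_iff]
  simp [PySem.Set.mem_ofList]

-- A's per-material value equals B's pick
theorem pvAns_eq_pickB (first_type : List String) (mat : String) :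
    pvAns first_type mat = pvPickB first_type mat := by
  unfold pvAns pvPickB
  rw [pvSet_contains]
  by_cases hmem : mat ∈ first_type
  · simp [hmem]
  · simp only [List.contains_eq_mem, decide_eq_true_eq, if_neg hmem]
    have h2 := pvDict_get PySem.Str.lower (fun x => pvLower_eq_empty) pvLower_empty
      first_type (PySem.Str.lower mat)
    have h3 := pvDict_get pvMatReplace (fun x => pvMatReplace_eq_empty) pvMatReplace_empty
      first_type (pvMatReplace mat)
    have hmask : (fun x => pvMatReplace x == pvMatReplace mat) = (fun x => pvMaskedB x == pvMaskedB mat) := by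
      funext x; rw [pvMatReplace_eq_pvMaskedB, pvMatReplace_eq_pvMaskedB]
    rw [hmask] at h3
    rw [PySem.Dict.contains_eq_isSome_get?, h2, PySem.Dict.contains_eq_isSome_get?, h3]
    rcases hf2 : first_type.find? (fun x => PySem.Str.lower x == PySem.Str.lower mat) with _ | x2
    · simp only [Option.isSome_none, Bool.false_eq_true, if_false]
      rcases hf3 : first_type.find? (fun x => pvMaskedB x == pvMaskedB mat) with _ | x3
      · simp
      · simp only [Option.isSome_some, if_true]
        rw [PySem.Dict.getD_eq_get?_getD, h3, hf3]
        rfl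
    · simp only [Option.isSome_some, if_true]
      rw [PySem.Dict.getD_eq_get?_getD, h2, hf2]
      rfl

-- ===== VERDICT (by name: the statement is the Claim_ definition above) =====
theorem get_right_materials_spec : Claim_equal_get_right_materials := by
  intro first_type materials _
  unfold Spec_get_right_materials get_right_materials get_right_materials_alt
  dsimp only
  have hbody : (fun (ans : List String) (mat : String) =>
      if PySem.Set.contains (PySem.Set.ofList first_type) mat then ans ++ [mat]
      else if (first_type.foldl (pvStep PySem.Str.lower) PySem.Dict.empty).contains (PySem.Str.lower mat) then
        ans ++ [(first_type.foldl (pvStep PySem.Str.lower) PySem.Dict.empty).getD (PySem.Str.lower mat) ""]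
      else if (first_type.foldl (pvStep pvMatReplace) PySem.Dict.empty).contains (pvMatReplace mat) then
        ans ++ [(first_type.foldl (pvStep pvMatReplace) PySem.Dict.empty).getD (pvMatReplace mat) ""]
      else ans ++ [""]) = fun ans mat => ans ++ [pvAns first_type mat] := by
    funext ans mat
    unfold pvAns
    split_ifs <;> rfl
  rw [hbody, PySem.List.foldl_append_singleton_eq_map]
  have : (materials.map (pvAns first_type)) = materials.map (pvPickB first_type) := by
    apply List.map_congr_left
    intro m _
    exact pvAns_eq_pickB first_type m
  rw [this]
  rw [List.nil_append]
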